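-- pv_equiv track=rewrite | github.com/tieaz/coding1 | f_flood_fill.py | count_perimter
-- ===== SOURCE A (Python) =====
-- def flood_fill_perimeter(matrix, r, c, color):
--   old_color = matrix[r][c]
--   m = len(matrix)
--   n = len(matrix[0])
--
--   def inner(rr, cc):
--     if not (0 <= rr < m and 0 <= cc < n):
--       return 0
--     if matrix[rr][cc] != old_color:
--       return 0
--
--     matrix[rr][cc] = color
--     is_perimeter = (
--       (rr > 0 and matrix[rr - 1][cc] == 0) or
--       (rr + 1 < m and matrix[rr + 1][cc] == 0) or
--       (cc > 0 and matrix[rr][cc - 1] == 0) or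
--       (cc + 1 < n and matrix[rr][cc + 1] == 0)
--     )
--     return (
--       int(is_perimeter) +
--       inner(rr - 1, cc) +
--       inner(rr + 1, cc) +
--       inner(rr, cc - 1) +
--       inner(rr, cc + 1)
--     )
--
--   return inner(r, c)
--
-- def count_perimter(matrix):
--   m = len(matrix)
--   n = len(matrix[0])
--   total_perimeter = 0
--   for r in range(m):
--     for c in range(n):
--       if matrix[r][c] == 1:
--         total_perimeter += flood_fill_perimeter(matrix, r, c, 2)
--
--   return total_perimeter
-- ===== SOURCE B (Python) =====
-- def count_perimter(matrix):
--   # Single scan, no recursion: a 1-cell is a perimeter cell iff some in-bounds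
--   # orthogonal neighbor is 0; 0-cells are never changed by A's flood fill, so
--   # this test on the original matrix agrees with A.  (A also mutates matrix in
--   # place, turning 1s into 2s; B does not mutate -- return value is the same.)
--   m = len(matrix)
--   n = len(matrix[0])
--   total = 0
--   for r in range(m):
--     for c in range(n):
--       if matrix[r][c] == 1 and (
--         (r > 0 and matrix[r - 1][c] == 0) or
--         (r + 1 < m and matrix[r + 1][c] == 0) or
--         (c > 0 and matrix[r][c - 1] == 0) or
--         (c + 1 < n and matrix[r][c + 1] == 0)
--       ):
--         total += 1
--   return total
-- ===== Notes on version B (the rewrite author's own statement) =====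
-- stated objective: simpler
-- what changed: Replaces the recursive flood-fill (which repaints each 1-region to 2 and counts perimeter cells during the fill) with a single non-mutating double scan that counts 1-cells having an in-bounds 0-neighbor; return value is identical, but B does not mutate the matrix in place.
import Mathlib
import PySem

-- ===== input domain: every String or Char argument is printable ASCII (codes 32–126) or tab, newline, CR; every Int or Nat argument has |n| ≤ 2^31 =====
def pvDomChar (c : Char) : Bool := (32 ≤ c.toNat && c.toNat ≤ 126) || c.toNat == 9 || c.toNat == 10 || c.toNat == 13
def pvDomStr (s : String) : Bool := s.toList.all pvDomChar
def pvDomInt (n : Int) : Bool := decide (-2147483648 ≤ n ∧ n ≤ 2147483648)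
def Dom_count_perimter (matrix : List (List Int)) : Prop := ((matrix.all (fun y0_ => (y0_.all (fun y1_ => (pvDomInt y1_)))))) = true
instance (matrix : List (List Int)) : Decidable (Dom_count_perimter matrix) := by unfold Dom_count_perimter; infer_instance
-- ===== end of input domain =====

-- B replaces A's recursive, matrix-mutating flood fill by one non-mutating double
-- scan counting 1-cells with an in-bounds 0-neighbor; the RETURN VALUE is proved
-- equal (A mutates its argument in place — 1s become 2 — B does not).

-- shared cell access/update and the 4-neighbor test both Pythons spell out literally
def cell (M : List (List Int)) (r c : Nat) : Int := (M.getD r []).getD c 0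

def setCell (M : List (List Int)) (r c : Nat) (v : Int) : List (List Int) :=
  M.set r ((M.getD r []).set c v)

def hasZeroNb (M : List (List Int)) (m n r c : Nat) : Bool :=
  decide ((0 < r ∧ cell M (r - 1) c = 0) ∨ (r + 1 < m ∧ cell M (r + 1) c = 0) ∨
          (0 < c ∧ cell M r (c - 1) = 0) ∨ (c + 1 < n ∧ cell M r (c + 1) = 0))

-- ===== PORT A =====
-- Python's `inner`: fuel-bounded structural recursion; fuel m*n+1 is proved
-- sufficient in the lemmas below (each recursive step first repaints a 1-cell).
def floodInner (oldc color : Int) (m n : Nat) :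
    Nat → List (List Int) → Int → Int → Int × List (List Int)
  | 0, M, _, _ => (0, M)
  | fuel + 1, M, rr, cc =>
    if 0 ≤ rr ∧ rr < (m : Int) ∧ 0 ≤ cc ∧ cc < (n : Int) then
      let r := rr.toNat
      let c := cc.toNat
      if cell M r c ≠ oldc then (0, M)
      else
        let M1 := setCell M r c color
        let isP := hasZeroNb M1 m n r c
        let p1 := floodInner oldc color m n fuel M1 (rr - 1) cc
        let p2 := floodInner oldc color m n fuel p1.2 (rr + 1) cc
        let p3 := floodInner oldc color m n fuel p2.2 rr (cc - 1)
        let p4 := floodInner oldc color m n fuel p3.2 rr (cc + 1)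
        ((if isP then 1 else 0) + p1.1 + p2.1 + p3.1 + p4.1, p4.2)
    else (0, M)

def flood_fill_perimeter (M : List (List Int)) (r c : Nat) (color : Int) :
    Int × List (List Int) :=
  let oldc := cell M r c
  let m := M.length
  let n := (M.headD []).length
  floodInner oldc color m n (m * n + 1) M (r : Int) (c : Int)

def count_perimter (matrix : List (List Int)) : Int :=
  let m := matrix.length
  let n := (matrix.headD []).length
  ((List.range m).foldl (fun st r =>
      (List.range n).foldl (fun (st : List (List Int) × Int) c =>
        if cell st.1 r c = 1 then
          let res := flood_fill_perimeter st.1 r c 2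
          (res.2, st.2 + res.1)
        else st) st) (matrix, 0)).2

-- ===== PORT B =====
def count_perimter_alt (matrix : List (List Int)) : Int :=
  let m := matrix.length
  let n := (matrix.headD []).length
  (List.range m).foldl (fun tot r =>
    (List.range n).foldl (fun tot c =>
      if cell matrix r c = 1 ∧ hasZeroNb matrix m n r c = true then tot + 1 else tot)
      tot) 0

-- ===== PRECONDITION & SPEC =====
-- Pre_ excludes exactly the inputs where the Python raises IndexError:
-- the empty matrix (len(matrix[0])) and matrices with a row shorter than row 0.
def Pre_count_perimter (matrix : List (List Int)) : Prop :=
  matrix ≠ [] ∧ ∀ row ∈ matrix, (matrix.headD []).length ≤ row.length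
instance (matrix : List (List Int)) : Decidable (Pre_count_perimter matrix) := by
  unfold Pre_count_perimter; infer_instance

def pvWitness_count_perimter : List (List Int) := [[1, 0], [1, 1]]

def Spec_count_perimter (matrix : List (List Int)) (out : Int) : Prop := out = count_perimter_alt matrix
instance (matrix : List (List Int)) (out : Int) : Decidable (Spec_count_perimter matrix out) := by unfold Spec_count_perimter; infer_instance

-- ===== CLAIM (what is proved, stated in full; the proofs are below) =====
def Claim_equal_count_perimter : Prop := ∀ (matrix : List (List Int)), Dom_count_perimter matrix → Pre_count_perimter matrix → Spec_count_perimter matrix (count_perimter matrix)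

-- ===== LEMMAS AND PROOFS =====

-- shape of a matrix: m rows, each of length ≥ n
def Shape (m n : Nat) (M : List (List Int)) : Prop :=
  M.length = m ∧ ∀ i, i < m → n ≤ (M.getD i []).length

-- the flood fill only turns 1s into 2s and keeps all row lengths
def Step (m n : Nat) (M M' : List (List Int)) : Prop :=
  M'.length = M.length ∧ (∀ i, (M'.getD i []).length = (M.getD i []).length) ∧
  ∀ r c, r < m → c < n →
    (cell M' r c = cell M r c ∨ (cell M r c = 1 ∧ cell M' r c = 2))

-- number of window cells equal to 1 (as an Int, for fuel bookkeeping)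
def ones (m n : Nat) (M : List (List Int)) : Int :=
  ∑ r ∈ Finset.range m, ∑ c ∈ Finset.range n, if cell M r c = 1 then 1 else 0

-- B's count, with the neighbor test frozen at M0
def ZB (m n : Nat) (M0 M : List (List Int)) : Int :=
  ∑ r ∈ Finset.range m, ∑ c ∈ Finset.range n,
    if cell M r c = 1 ∧ hasZeroNb M0 m n r c = true then 1 else 0

lemma step_refl (m n : Nat) (M : List (List Int)) : Step m n M M := by
  refine ⟨rfl, fun _ => rfl, fun r c _ _ => Or.inl rfl⟩

lemma step_trans {m n : Nat} {M1 M2 M3 : List (List Int)}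
    (h1 : Step m n M1 M2) (h2 : Step m n M2 M3) : Step m n M1 M3 := by
  obtain ⟨l1, r1, c1⟩ := h1
  obtain ⟨l2, r2, c2⟩ := h2
  refine ⟨l2.trans l1, fun i => (r2 i).trans (r1 i), fun r c hr hc => ?_⟩
  rcases c2 r c hr hc with h | ⟨h21, h22⟩
  · rcases c1 r c hr hc with h' | ⟨h11, h12⟩
    · exact Or.inl (h.trans h')
    · exact Or.inr ⟨h11, h ▸ h12⟩
  · rcases c1 r c hr hc with h' | ⟨h11, h12⟩
    · exact Or.inr ⟨h' ▸ h21, h22⟩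
    · rw [h12] at h21; cases h21

lemma shape_of_step {m n : Nat} {M0 M : List (List Int)}
    (h0 : Shape m n M0) (h : Step m n M0 M) : Shape m n M := by
  obtain ⟨l0, r0⟩ := h0
  obtain ⟨l, r, _⟩ := h
  exact ⟨l.trans l0, fun i hi => (r i) ▸ r0 i hi⟩

lemma step_ne_one {m n : Nat} {M M' : List (List Int)} (h : Step m n M M')
    {r c : Nat} (hr : r < m) (hc : c < n) (h1 : cell M r c ≠ 1) :
    cell M' r c ≠ 1 := by
  rcases h.2.2 r c hr hc with he | ⟨he, _⟩
  · rw [he]; exact h1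
  · exact absurd he h1

lemma step_zero_iff {m n : Nat} {M M' : List (List Int)} (h : Step m n M M')
    {r c : Nat} (hr : r < m) (hc : c < n) :
    (cell M' r c = 0 ↔ cell M r c = 0) := by
  rcases h.2.2 r c hr hc with he | ⟨h1, h2⟩
  · rw [he]
  · rw [h1, h2]; omega

lemma hasZeroNb_congr {m n : Nat} {M M' : List (List Int)} (h : Step m n M M')
    {r c : Nat} (hr : r < m) (hc : c < n) :
    hasZeroNb M' m n r c = hasZeroNb M m n r c := by
  unfold hasZeroNb
  apply decide_eq_decide.mpr
  constructor <;> intro hh <;>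
    rcases hh with ⟨h1, h2⟩ | ⟨h1, h2⟩ | ⟨h1, h2⟩ | ⟨h1, h2⟩
  · exact Or.inl ⟨h1, (step_zero_iff h (by omega) hc).mp h2⟩
  · exact Or.inr (Or.inl ⟨h1, (step_zero_iff h h1 hc).mp h2⟩)
  · exact Or.inr (Or.inr (Or.inl ⟨h1, (step_zero_iff h hr (by omega)).mp h2⟩))
  · exact Or.inr (Or.inr (Or.inr ⟨h1, (step_zero_iff h hr h1).mp h2⟩))
  · exact Or.inl ⟨h1, (step_zero_iff h (by omega) hc).mpr h2⟩
  · exact Or.inr (Or.inl ⟨h1, (step_zero_iff h h1 hc).mpr h2⟩)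
  · exact Or.inr (Or.inr (Or.inl ⟨h1, (step_zero_iff h hr (by omega)).mpr h2⟩))
  · exact Or.inr (Or.inr (Or.inr ⟨h1, (step_zero_iff h hr h1).mpr h2⟩))

lemma getD_set_eq {α : Type} (l : List α) (i : Nat) (hi : i < l.length) (a d : α) :
    (l.set i a).getD i d = a := by
  simp [List.getD_eq_getElem?_getD, List.getElem?_set_self', List.getElem?_eq_getElem hi,
    Function.const]

lemma getD_set_ne {α : Type} (l : List α) {i j : Nat} (h : i ≠ j) (a d : α) :
    (l.set i a).getD j d = l.getD j d := by
  simp [List.getD_eq_getElem?_getD, List.getElem?_set_ne h]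

lemma cell_setCell {M : List (List Int)} {r c : Nat}
    (hr : r < M.length) (hc : c < (M.getD r []).length) (v : Int) (r' c' : Nat) :
    cell (setCell M r c v) r' c' = if r' = r ∧ c' = c then v else cell M r' c' := by
  unfold cell setCell
  by_cases hrr : r' = r
  · subst hrr
    rw [getD_set_eq M r' hr]
    by_cases hcc : c' = c
    · subst hcc
      rw [if_pos ⟨rfl, rfl⟩, getD_set_eq _ c' hc]
    · rw [if_neg (by simp [hcc]), getD_set_ne _ (fun h => hcc h.symm)]
  · rw [if_neg (by simp [hrr]), getD_set_ne M (fun h => hrr h.symm)]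

lemma length_setCell (M : List (List Int)) (r c : Nat) (v : Int) :
    (setCell M r c v).length = M.length := by
  simp [setCell]

lemma rowlen_setCell (M : List (List Int)) (r c : Nat) (v : Int) (i : Nat)
    (hr : r < M.length) :
    ((setCell M r c v).getD i []).length = (M.getD i []).length := by
  unfold setCell
  by_cases hi : i = r
  · subst hi
    rw [getD_set_eq M i hr, List.length_set]
  · rw [getD_set_ne M (fun h => hi h.symm)]

-- two double sums whose terms agree except at one window point
lemma sum2_update {m n : Nat} (f g : Nat → Nat → Int) {r c : Nat}
    (hr : r < m) (hc : c < n)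
    (h : ∀ r' c', r' < m → c' < n → ¬(r' = r ∧ c' = c) → f r' c' = g r' c') :
    (∑ r' ∈ Finset.range m, ∑ c' ∈ Finset.range n, f r' c') + g r c
      = (∑ r' ∈ Finset.range m, ∑ c' ∈ Finset.range n, g r' c') + f r c := by
  have hrm : r ∈ Finset.range m := Finset.mem_range.mpr hr
  have hcn : c ∈ Finset.range n := Finset.mem_range.mpr hc
  have hcs : ∑ c' ∈ (Finset.range n).erase c, f r c'
      = ∑ c' ∈ (Finset.range n).erase c, g r c' := by
    refine Finset.sum_congr rfl (fun c' hc' => ?_)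
    exact h r c' hr (Finset.mem_range.mp (Finset.mem_of_mem_erase hc'))
      (by have := Finset.ne_of_mem_erase hc'; tauto)
  have hrows : ∑ r' ∈ (Finset.range m).erase r, ∑ c' ∈ Finset.range n, f r' c'
      = ∑ r' ∈ (Finset.range m).erase r, ∑ c' ∈ Finset.range n, g r' c' := by
    refine Finset.sum_congr rfl (fun r' hr' => ?_)
    refine Finset.sum_congr rfl (fun c' hc' => ?_)
    exact h r' c' (Finset.mem_range.mp (Finset.mem_of_mem_erase hr'))
      (Finset.mem_range.mp hc') (by have := Finset.ne_of_mem_erase hr'; tauto)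
  rw [← Finset.sum_erase_add (Finset.range m) _ hrm,
      ← Finset.sum_erase_add (Finset.range m) _ hrm,
      ← Finset.sum_erase_add (Finset.range n) (f r) hcn,
      ← Finset.sum_erase_add (Finset.range n) (g r) hcn, hcs, hrows]
  ring

lemma ones_nonneg (m n : Nat) (M : List (List Int)) : 0 ≤ ones m n M := by
  apply Finset.sum_nonneg; intro r _
  apply Finset.sum_nonneg; intro c _
  split <;> omega

lemma ones_le (m n : Nat) (M : List (List Int)) : ones m n M ≤ (m : Int) * n := by
  unfold ones
  calc ∑ r ∈ Finset.range m, ∑ c ∈ Finset.range n,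
        (if cell M r c = 1 then (1 : Int) else 0)
      ≤ ∑ _r ∈ Finset.range m, ∑ _c ∈ Finset.range n, (1 : Int) := by
        refine Finset.sum_le_sum (fun r _ => Finset.sum_le_sum (fun c _ => ?_))
        split <;> omega
    _ = (m : Int) * n := by simp

lemma ones_mono {m n : Nat} {M M' : List (List Int)} (h : Step m n M M') :
    ones m n M' ≤ ones m n M := by
  apply Finset.sum_le_sum; intro r hr
  apply Finset.sum_le_sum; intro c hc
  simp only [Finset.mem_range] at hr hc
  rcases h.2.2 r c hr hc with he | ⟨h1, h2⟩
  · rw [he]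
  · rw [h1, h2]; norm_num

-- ===== the flood-fill characterisation =====
lemma floodInner_spec {m n : Nat} (M0 : List (List Int)) (h0 : Shape m n M0) :
    ∀ (fuel : Nat) (M : List (List Int)) (rr cc : Int), Step m n M0 M →
      ones m n M < (fuel : Int) →
      ∃ M', floodInner 1 2 m n fuel M rr cc = (ZB m n M0 M - ZB m n M0 M', M') ∧
        Step m n M M' ∧
        ((0 ≤ rr ∧ rr < (m : Int) ∧ 0 ≤ cc ∧ cc < (n : Int) ∧
            cell M rr.toNat cc.toNat = 1) → cell M' rr.toNat cc.toNat = 2) := by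
  intro fuel
  induction fuel with
  | zero =>
    intro M rr cc _ hf
    have := ones_nonneg m n M
    simp only [Nat.cast_zero] at hf
    omega
  | succ f ih =>
    intro M rr cc hstep hf
    by_cases hb : 0 ≤ rr ∧ rr < (m : Int) ∧ 0 ≤ cc ∧ cc < (n : Int)
    · have hr : rr.toNat < m := by omega
      have hc : cc.toNat < n := by omega
      by_cases h1 : cell M rr.toNat cc.toNat = 1
      · -- main branch: repaint the cell and recurse four times
        have hshape : Shape m n M := shape_of_step h0 hstep
        have hrM : rr.toNat < M.length := by rw [hshape.1]; exact hr
        have hcM : cc.toNat < (M.getD rr.toNat []).length :=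
          lt_of_lt_of_le hc (hshape.2 rr.toNat hr)
        have cellM1 := cell_setCell hrM hcM 2
        have step1 : Step m n M (setCell M rr.toNat cc.toNat 2) := by
          refine ⟨length_setCell M _ _ _, fun i => rowlen_setCell M _ _ _ i hrM,
            fun r' c' hr' hc' => ?_⟩
          rw [cellM1 r' c']
          by_cases hp : r' = rr.toNat ∧ c' = cc.toNat
          · obtain ⟨rfl, rfl⟩ := hp
            exact Or.inr ⟨h1, by simp⟩
          · rw [if_neg hp]; exact Or.inl rfl
        have stepM01 := step_trans hstep step1
        have hcell1 : cell (setCell M rr.toNat cc.toNat 2) rr.toNat cc.toNat = 2 := by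
          rw [cellM1]; simp
        have ones1 : ones m n (setCell M rr.toNat cc.toNat 2) = ones m n M - 1 := by
          have := sum2_update
            (fun r' c' => if cell (setCell M rr.toNat cc.toNat 2) r' c' = 1 then (1 : Int) else 0)
            (fun r' c' => if cell M r' c' = 1 then (1 : Int) else 0) hr hc
            (fun r' c' _ _ hne => by dsimp only; rw [cellM1 r' c', if_neg hne])
          dsimp only at this
          simp only [h1, hcell1] at this
          rw [if_pos trivial, if_neg (by norm_num : ¬(2 : Int) = 1)] at this
          unfold ones
          omega
        have zb1 : ZB m n M0 (setCell M rr.toNat cc.toNat 2)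
            = ZB m n M0 M - (if hasZeroNb M0 m n rr.toNat cc.toNat = true then 1 else 0) := by
          have := sum2_update
            (fun r' c' => if cell (setCell M rr.toNat cc.toNat 2) r' c' = 1 ∧
                hasZeroNb M0 m n r' c' = true then (1 : Int) else 0)
            (fun r' c' => if cell M r' c' = 1 ∧ hasZeroNb M0 m n r' c' = true then (1 : Int) else 0)
            hr hc (fun r' c' _ _ hne => by dsimp only; rw [cellM1 r' c', if_neg hne])
          dsimp only at this
          simp only [h1, hcell1] at this
          unfold ZB
          by_cases hhz : hasZeroNb M0 m n rr.toNat cc.toNat = true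
          · rw [if_pos ⟨trivial, hhz⟩, if_neg (fun h => absurd h.1 (by norm_num))] at this
            rw [if_pos hhz]
            omega
          · rw [if_neg (fun h => hhz h.2), if_neg (fun h => hhz h.2)] at this
            rw [if_neg hhz]
            omega
        have isP : hasZeroNb (setCell M rr.toNat cc.toNat 2) m n rr.toNat cc.toNat
            = hasZeroNb M0 m n rr.toNat cc.toNat := hasZeroNb_congr stepM01 hr hc
        have hf1 : ones m n (setCell M rr.toNat cc.toNat 2) < (f : Int) := by
          push_cast at hf; omega
        obtain ⟨M2, e1, s12, _⟩ := ih (setCell M rr.toNat cc.toNat 2) (rr - 1) cc stepM01 hf1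
        have stepM02 := step_trans stepM01 s12
        have hf2 : ones m n M2 < (f : Int) := lt_of_le_of_lt (ones_mono s12) hf1
        obtain ⟨M3, e2, s23, _⟩ := ih M2 (rr + 1) cc stepM02 hf2
        have stepM03 := step_trans stepM02 s23
        have hf3 : ones m n M3 < (f : Int) := lt_of_le_of_lt (ones_mono s23) hf2
        obtain ⟨M4, e3, s34, _⟩ := ih M3 rr (cc - 1) stepM03 hf3
        have stepM04 := step_trans stepM03 s34
        have hf4 : ones m n M4 < (f : Int) := lt_of_le_of_lt (ones_mono s34) hf3
        obtain ⟨M5, e4, s45, _⟩ := ih M4 rr (cc + 1) stepM04 hf4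
        have step15 : Step m n (setCell M rr.toNat cc.toNat 2) M5 :=
          step_trans s12 (step_trans s23 (step_trans s34 s45))
        refine ⟨M5, ?_, step_trans step1 step15, fun _ => ?_⟩
        · show (if 0 ≤ rr ∧ rr < (m : Int) ∧ 0 ≤ cc ∧ cc < (n : Int) then _ else _) = _
          rw [if_pos hb, if_neg (not_not_intro h1)]
          dsimp only
          simp only [e1, e2, e3, e4, isP, Prod.mk.injEq]
          refine ⟨?_, trivial⟩
          rw [zb1]
          split <;> ring
        · rcases step15.2.2 rr.toNat cc.toNat hr hc with he | ⟨he, _⟩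
          · rw [he]; exact hcell1
          · rw [hcell1] at he; cases he
      · -- cell is not 1: return (0, M) unchanged
        refine ⟨M, ?_, step_refl m n M, fun hh => absurd hh.2.2.2.2 h1⟩
        show (if 0 ≤ rr ∧ rr < (m : Int) ∧ 0 ≤ cc ∧ cc < (n : Int) then _ else _) = _
        rw [if_pos hb, if_pos h1]
        simp
    · refine ⟨M, ?_, step_refl m n M, fun hh => absurd ⟨hh.1, hh.2.1, hh.2.2.1, hh.2.2.2.1⟩ hb⟩
      show (if 0 ≤ rr ∧ rr < (m : Int) ∧ 0 ≤ cc ∧ cc < (n : Int) then _ else _) = _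
      rw [if_neg hb]
      simp

lemma headD_eq_getD (l : List (List Int)) : l.headD [] = l.getD 0 [] := by
  cases l <;> rfl

lemma flood_spec (m n : Nat) (M0 : List (List Int)) (h0 : Shape m n M0)
    (hm : M0.length = m) (hn : (M0.headD []).length = n)
    (M : List (List Int)) (r c : Nat) (hstep : Step m n M0 M)
    (hr : r < m) (hc : c < n) (h1 : cell M r c = 1) :
    ∃ M', flood_fill_perimeter M r c 2 = (ZB m n M0 M - ZB m n M0 M', M') ∧
      Step m n M M' ∧ cell M' r c ≠ 1 := by
  have hlen : M.length = m := hstep.1.trans hm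
  have hrow : (M.headD []).length = n := by
    rw [headD_eq_getD, hstep.2.1 0, ← headD_eq_getD, hn]
  have hfuel : ones m n M < ((m * n + 1 : Nat) : Int) := by
    have := ones_le m n M
    push_cast
    omega
  obtain ⟨M', heq, hs, hcell⟩ := floodInner_spec M0 h0 (m * n + 1) M (r : Int) (c : Int)
    hstep hfuel
  refine ⟨M', ?_, hs, ?_⟩
  · unfold flood_fill_perimeter
    rw [h1, hlen, hrow]
    exact heq
  · have h2 : cell M' r c = 2 := by
      have := hcell ⟨by positivity, by exact_mod_cast hr, by positivity, by exact_mod_cast hc,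
        by simpa using h1⟩
      simpa using this
    rw [h2]; norm_num

lemma colfold (m n : Nat) (M0 : List (List Int)) (h0 : Shape m n M0)
    (hm : M0.length = m) (hn : (M0.headD []).length = n)
    (r : Nat) (hrm : r < m) :
    ∀ (k : Nat), k ≤ n → ∀ (M : List (List Int)) (tot : Int), Step m n M0 M →
      tot + ZB m n M0 M = ZB m n M0 M0 →
      (∀ r' c', r' < r → c' < n → cell M r' c' ≠ 1) →
      (Step m n M0 ((List.range k).foldl (fun (st : List (List Int) × Int) c =>
          if cell st.1 r c = 1 then
            let res := flood_fill_perimeter st.1 r c 2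
            (res.2, st.2 + res.1)
          else st) (M, tot)).1 ∧
       ((List.range k).foldl (fun (st : List (List Int) × Int) c =>
          if cell st.1 r c = 1 then
            let res := flood_fill_perimeter st.1 r c 2
            (res.2, st.2 + res.1)
          else st) (M, tot)).2
          + ZB m n M0 ((List.range k).foldl (fun (st : List (List Int) × Int) c =>
          if cell st.1 r c = 1 then
            let res := flood_fill_perimeter st.1 r c 2
            (res.2, st.2 + res.1)
          else st) (M, tot)).1 = ZB m n M0 M0 ∧
       (∀ r' c', r' < r → c' < n →
          cell ((List.range k).foldl (fun (st : List (List Int) × Int) c =>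
          if cell st.1 r c = 1 then
            let res := flood_fill_perimeter st.1 r c 2
            (res.2, st.2 + res.1)
          else st) (M, tot)).1 r' c' ≠ 1) ∧
       (∀ c', c' < k →
          cell ((List.range k).foldl (fun (st : List (List Int) × Int) c =>
          if cell st.1 r c = 1 then
            let res := flood_fill_perimeter st.1 r c 2
            (res.2, st.2 + res.1)
          else st) (M, tot)).1 r c' ≠ 1)) := by
  intro k
  induction k with
  | zero =>
    intro _ M tot hstep htot hrows
    simp only [List.range_zero, List.foldl_nil]
    exact ⟨hstep, htot, hrows, fun c' hc' => absurd hc' (Nat.not_lt_zero c')⟩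
  | succ k ihk =>
    intro hk M tot hstep htot hrows
    obtain ⟨i1, i2, i3, i4⟩ := ihk (by omega) M tot hstep htot hrows
    simp only [List.range_succ, List.foldl_append, List.foldl_cons, List.foldl_nil] at *
    by_cases hcase : cell ((List.range k).foldl (fun (st : List (List Int) × Int) c =>
          if cell st.1 r c = 1 then
            let res := flood_fill_perimeter st.1 r c 2
            (res.2, st.2 + res.1)
          else st) (M, tot)).1 r k = 1
    · rw [if_pos hcase]
      obtain ⟨M', heq, hsk, hne1⟩ := flood_spec m n M0 h0 hm hn _ r k i1 hrm (by omega) hcase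
      rw [heq]
      refine ⟨step_trans i1 hsk, by dsimp only; omega, ?_, ?_⟩
      · intro r' c' hr' hc'
        exact step_ne_one hsk (by omega) hc' (i3 r' c' hr' hc')
      · intro c' hc'
        rcases Nat.lt_or_ge c' k with h | h
        · exact step_ne_one hsk hrm (by omega) (i4 c' h)
        · have : c' = k := by omega
          subst this
          exact hne1
    · rw [if_neg hcase]
      refine ⟨i1, i2, i3, ?_⟩
      intro c' hc'
      rcases Nat.lt_or_ge c' k with h | h
      · exact i4 c' h
      · have : c' = k := by omega
        subst this
        exact hcase

lemma rowfold (m n : Nat) (M0 : List (List Int)) (h0 : Shape m n M0)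
    (hm : M0.length = m) (hn : (M0.headD []).length = n) :
    ∀ (k : Nat), k ≤ m →
      (Step m n M0 ((List.range k).foldl (fun st r =>
          (List.range n).foldl (fun (st : List (List Int) × Int) c =>
            if cell st.1 r c = 1 then
              let res := flood_fill_perimeter st.1 r c 2
              (res.2, st.2 + res.1)
            else st) st) (M0, 0)).1 ∧
       ((List.range k).foldl (fun st r =>
          (List.range n).foldl (fun (st : List (List Int) × Int) c =>
            if cell st.1 r c = 1 then
              let res := flood_fill_perimeter st.1 r c 2
              (res.2, st.2 + res.1)
            else st) st) (M0, 0)).2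
          + ZB m n M0 ((List.range k).foldl (fun st r =>
          (List.range n).foldl (fun (st : List (List Int) × Int) c =>
            if cell st.1 r c = 1 then
              let res := flood_fill_perimeter st.1 r c 2
              (res.2, st.2 + res.1)
            else st) st) (M0, 0)).1 = ZB m n M0 M0 ∧
       (∀ r' c', r' < k → c' < n →
          cell ((List.range k).foldl (fun st r =>
          (List.range n).foldl (fun (st : List (List Int) × Int) c =>
            if cell st.1 r c = 1 then
              let res := flood_fill_perimeter st.1 r c 2
              (res.2, st.2 + res.1)
            else st) st) (M0, 0)).1 r' c' ≠ 1)) := by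
  intro k
  induction k with
  | zero =>
    intro _
    simp only [List.range_zero, List.foldl_nil]
    exact ⟨step_refl m n M0, by simp, fun r' c' hr' _ => absurd hr' (Nat.not_lt_zero r')⟩
  | succ k ihk =>
    intro hk
    obtain ⟨i1, i2, i3⟩ := ihk (by omega)
    simp only [List.range_succ, List.foldl_append, List.foldl_cons, List.foldl_nil] at *
    obtain ⟨j1, j2, j3, j4⟩ := colfold m n M0 h0 hm hn k (by omega) n le_rfl _ _ i1 i2
      (fun r' c' hr' hc' => i3 r' c' hr' hc')
    refine ⟨j1, j2, ?_⟩
    intro r' c' hr' hc'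
    rcases Nat.lt_or_ge r' k with h | h
    · exact j3 r' c' h hc'
    · have : r' = k := by omega
      subst this
      exact j4 c' hc'

lemma foldl_if_count (p : Nat → Prop) [DecidablePred p] :
    ∀ (k : Nat) (t0 : Int),
      (List.range k).foldl (fun t c => if p c then t + 1 else t) t0
        = t0 + ∑ c ∈ Finset.range k, (if p c then (1 : Int) else 0) := by
  intro k
  induction k with
  | zero => intro t0; simp
  | succ k ihk =>
    intro t0
    rw [List.range_succ, List.foldl_append, List.foldl_cons, List.foldl_nil, ihk,
      Finset.sum_range_succ]
    split <;> ring

lemma foldl2_count (q : Nat → Nat → Prop) [inst : ∀ r c, Decidable (q r c)] (n : Nat) :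
    ∀ (m : Nat) (t0 : Int),
      (List.range m).foldl (fun tot r =>
        (List.range n).foldl (fun tot c => if q r c then tot + 1 else tot) tot) t0
        = t0 + ∑ r ∈ Finset.range m, ∑ c ∈ Finset.range n, (if q r c then (1 : Int) else 0) := by
  intro m
  induction m with
  | zero => intro t0; simp
  | succ m ihm =>
    intro t0
    rw [List.range_succ, List.foldl_append, List.foldl_cons, List.foldl_nil, ihm,
      Finset.sum_range_succ, foldl_if_count]
    ring

lemma alt_eq_ZB (matrix : List (List Int)) :
    count_perimter_alt matrix
      = ZB matrix.length (matrix.headD []).length matrix matrix := by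
  unfold count_perimter_alt ZB
  dsimp only
  rw [foldl2_count (fun r c => cell matrix r c = 1 ∧
    hasZeroNb matrix matrix.length (matrix.headD []).length r c = true)
    (matrix.headD []).length matrix.length 0]
  simp

lemma zb_zero {m n : Nat} {M0 M : List (List Int)}
    (h : ∀ r c, r < m → c < n → cell M r c ≠ 1) : ZB m n M0 M = 0 := by
  apply Finset.sum_eq_zero; intro r hr
  apply Finset.sum_eq_zero; intro c hc
  simp only [Finset.mem_range] at hr hc
  simp [h r c hr hc]

-- ===== VERDICT (by name: the statement is the Claim_ definition above) =====
theorem count_perimter_spec : Claim_equal_count_perimter := by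
  intro matrix _ hpre
  unfold Pre_count_perimter at hpre
  obtain ⟨hne, hrows⟩ := hpre
  unfold Spec_count_perimter
  have h0 : Shape matrix.length (matrix.headD []).length matrix := by
    refine ⟨rfl, fun i hi => ?_⟩
    have hmem : matrix.getD i [] ∈ matrix := by
      rw [List.getD_eq_getElem?_getD, (List.getElem?_eq_getElem hi : matrix[i]? = some matrix[i])]
      exact List.getElem_mem hi
    exact hrows _ hmem
  obtain ⟨f1, f2, f3⟩ := rowfold matrix.length (matrix.headD []).length matrix h0 rfl rfl
    matrix.length le_rfl
  have hzb0 := zb_zero (M0 := matrix) f3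
  unfold count_perimter
  dsimp only at f2 hzb0 ⊢
  rw [alt_eq_ZB]
  omega
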